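-- pv_equiv track=rewrite | github.com/BensonZhou1991/Circuit-Transformation-via-Monte-Carlo-Tree-Search | inputs/map.py | MapListPhyToLog
-- ===== SOURCE A (Python) =====
-- def MapListPhyToLog(map_list, q_phy_list):
--     q_log_list = [-1] * len(q_phy_list)
--     if len(q_phy_list) == 2:
--         for q_log in range(len(map_list)):
--             if map_list[q_log] == q_phy_list[0]:
--                 q_log_list[0] = q_log
--             if map_list[q_log] == q_phy_list[1]:
--                 q_log_list[1] = q_log
--     if len(q_phy_list) == 1:
--         for q_log in range(len(map_list)):
--             if map_list[q_log] == q_phy_list[0]: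
--                 q_log_list[0] = q_log
--     return q_log_list
-- ===== SOURCE B (Python) =====
-- def _rindex(map_list, q):
--     # backward search with early exit: first match from the right = last occurrence
--     for i, v in enumerate(reversed(map_list)):
--         if v == q:
--             return len(map_list) - 1 - i
--     return -1
--
-- def MapListPhyToLog(map_list, q_phy_list):
--     if len(q_phy_list) in (1, 2):
--         return [_rindex(map_list, q) for q in q_phy_list]
--     return [-1] * len(q_phy_list)
-- ===== Notes on version B (the rewrite author's own statement) =====
-- stated objective: alternative
-- what changed: A makes one forward pass per length case, overwriting each slot on every match; B searches each queried value backwards through reversed(map_list) and returns at the first hit (early exit), which is the last occurrence, never overwriting.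
import Mathlib
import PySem

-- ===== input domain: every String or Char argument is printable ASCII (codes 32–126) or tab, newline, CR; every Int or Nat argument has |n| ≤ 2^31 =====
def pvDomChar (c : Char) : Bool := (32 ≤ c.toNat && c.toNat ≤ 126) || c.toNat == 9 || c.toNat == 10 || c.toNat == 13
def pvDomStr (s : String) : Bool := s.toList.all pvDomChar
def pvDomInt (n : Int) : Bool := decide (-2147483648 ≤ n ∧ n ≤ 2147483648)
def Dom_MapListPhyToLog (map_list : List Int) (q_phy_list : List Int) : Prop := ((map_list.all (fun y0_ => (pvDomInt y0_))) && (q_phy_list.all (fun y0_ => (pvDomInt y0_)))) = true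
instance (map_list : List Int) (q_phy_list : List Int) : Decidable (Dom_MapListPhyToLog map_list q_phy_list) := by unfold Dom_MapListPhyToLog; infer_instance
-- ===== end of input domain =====

-- B replaces A's forward overwrite-on-every-match passes by a per-query backward search with early exit (first hit from the right = last occurrence); alternative decomposition, same return value.

-- ===== PORT A =====
def MapListPhyToLog (map_list : List Int) (q_phy_list : List Int) : List Int :=
  let q_log_list : List Int := List.replicate q_phy_list.length (-1)
  let q_log_list :=
    if q_phy_list.length = 2 then
      (PySem.List.pyRange 0 map_list.length 1).foldl (fun acc q_log =>
        let acc := if PySem.List.pyGet? map_list q_log = PySem.List.pyGet? q_phy_list 0 then acc.set 0 q_log else acc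
        let acc := if PySem.List.pyGet? map_list q_log = PySem.List.pyGet? q_phy_list 1 then acc.set 1 q_log else acc
        acc) q_log_list
    else q_log_list
  let q_log_list :=
    if q_phy_list.length = 1 then
      (PySem.List.pyRange 0 map_list.length 1).foldl (fun acc q_log =>
        if PySem.List.pyGet? map_list q_log = PySem.List.pyGet? q_phy_list 0 then acc.set 0 q_log else acc) q_log_list
    else q_log_list
  q_log_list

-- ===== PORT B =====
-- helper _rindex: 'for i, v in enumerate(reversed(map_list)): if v == q: return len-1-i' / 'return -1';
-- the early-exit loop over the reversed list is findIdx? on ml.reverse (exact).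
def pvRindex (ml : List Int) (q : Int) : Int :=
  match ml.reverse.findIdx? (fun v => v == q) with
  | some i => (ml.length : Int) - 1 - (i : Int)
  | none => -1

def MapListPhyToLog_alt (map_list : List Int) (q_phy_list : List Int) : List Int :=
  if q_phy_list.length = 1 ∨ q_phy_list.length = 2 then
    q_phy_list.map (fun q => pvRindex map_list q)
  else
    List.replicate q_phy_list.length (-1)

-- ===== PRECONDITION & SPEC =====
def Spec_MapListPhyToLog (map_list : List Int) (q_phy_list : List Int) (out : List Int) : Prop := out = MapListPhyToLog_alt map_list q_phy_list
instance (map_list : List Int) (q_phy_list : List Int) (out : List Int) : Decidable (Spec_MapListPhyToLog map_list q_phy_list out) := by unfold Spec_MapListPhyToLog; infer_instance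

-- ===== CLAIM (what is proved, stated in full; the proofs are below) =====
def Claim_equal_MapListPhyToLog : Prop := ∀ (map_list : List Int) (q_phy_list : List Int), Dom_MapListPhyToLog map_list q_phy_list → Spec_MapListPhyToLog map_list q_phy_list (MapListPhyToLog map_list q_phy_list)

-- ===== LEMMAS AND PROOFS =====

lemma pvRindex_snoc (ml : List Int) (x q : Int) :
    pvRindex (ml ++ [x]) q = if q = x then (ml.length : Int) else pvRindex ml q := by
  unfold pvRindex
  rw [List.reverse_append]
  simp only [List.reverse_cons, List.reverse_nil, List.nil_append, List.singleton_append,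
    List.findIdx?_cons]
  by_cases h : x = q
  · simp [h]
  · simp only [beq_iff_eq, h, if_false]
    cases hfi : ml.reverse.findIdx? (fun v => v == q) with
    | none => simp [Ne.symm h]
    | some i =>
      simp only [Option.map_some, List.length_append, List.length_cons, List.length_nil]
      rw [if_neg (fun hq => h hq.symm)]
      push_cast
      ring

lemma pvRindex_notMem (ml : List Int) (q : Int) (h : q ∉ ml) : pvRindex ml q = -1 := by
  unfold pvRindex
  rw [List.findIdx?_eq_none_iff.mpr]
  intro v hv
  simp only [beq_eq_false_iff_ne, ne_eq]
  rintro rfl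
  exact h (List.mem_reverse.mp hv)

lemma pvGet_snoc_eq (ml : List Int) (x : Int) (i : Int) (hi : 0 ≤ i ∧ i < (ml.length : Int)) :
    PySem.List.pyGet? (ml ++ [x]) i = PySem.List.pyGet? ml i := by
  rw [PySem.List.pyGet?_of_nonneg (ml ++ [x]) hi.1,
      PySem.List.pyGet?_of_nonneg ml hi.1]
  rw [List.getElem?_append_left (by omega)]

lemma pvFoldA1 (ml : List Int) (q a : Int) :
    (PySem.List.pyRange 0 ml.length 1).foldl
      (fun acc i => if PySem.List.pyGet? ml i = some q then acc.set 0 i else acc) [a]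
    = [if q ∈ ml then pvRindex ml q else a] := by
  induction ml using List.reverseRecOn generalizing a with
  | nil => simp [PySem.List.pyRange_one_eq_nil]
  | append_singleton ml x ih =>
    have hlen : ((ml ++ [x]).length : Int) = (ml.length : Int) + 1 := by simp
    rw [hlen, PySem.List.pyRange_one_succ_right (by positivity), List.foldl_append]
    have hpref :
        (PySem.List.pyRange 0 ml.length 1).foldl
          (fun (acc : List Int) i =>
            if PySem.List.pyGet? (ml ++ [x]) i = some q then acc.set 0 i else acc) [a]
        = [if q ∈ ml then pvRindex ml q else a] := by
      refine Eq.trans (PySem.List.foldl_congr_mem _ _ _ _ ?_) (ih a)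
      intro acc i hi
      rw [PySem.List.mem_pyRange_one] at hi
      rw [pvGet_snoc_eq ml x i hi]
    rw [hpref]
    simp only [List.foldl_cons, List.foldl_nil, PySem.List.pyGet?_append_length,
      pvRindex_snoc]
    by_cases h : q = x <;> simp [h, eq_comm]

lemma pvFoldA2 (ml : List Int) (q0 q1 a b : Int) :
    (PySem.List.pyRange 0 ml.length 1).foldl
      (fun acc i =>
        if PySem.List.pyGet? ml i = some q1 then
          (if PySem.List.pyGet? ml i = some q0 then acc.set 0 i else acc).set 1 i
        else if PySem.List.pyGet? ml i = some q0 then acc.set 0 i else acc) [a, b]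
    = [if q0 ∈ ml then pvRindex ml q0 else a, if q1 ∈ ml then pvRindex ml q1 else b] := by
  induction ml using List.reverseRecOn generalizing a b with
  | nil => simp [PySem.List.pyRange_one_eq_nil]
  | append_singleton ml x ih =>
    have hlen : ((ml ++ [x]).length : Int) = (ml.length : Int) + 1 := by simp
    rw [hlen, PySem.List.pyRange_one_succ_right (by positivity), List.foldl_append]
    have hpref :
        (PySem.List.pyRange 0 ml.length 1).foldl
          (fun (acc : List Int) i =>
            if PySem.List.pyGet? (ml ++ [x]) i = some q1 then
              (if PySem.List.pyGet? (ml ++ [x]) i = some q0 then acc.set 0 i else acc).set 1 i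
            else if PySem.List.pyGet? (ml ++ [x]) i = some q0 then acc.set 0 i else acc) [a, b]
        = [if q0 ∈ ml then pvRindex ml q0 else a, if q1 ∈ ml then pvRindex ml q1 else b] := by
      refine Eq.trans (PySem.List.foldl_congr_mem _ _ _ _ ?_) (ih a b)
      intro acc i hi
      rw [PySem.List.mem_pyRange_one] at hi
      rw [pvGet_snoc_eq ml x i hi]
    rw [hpref]
    simp only [List.foldl_cons, List.foldl_nil, PySem.List.pyGet?_append_length,
      pvRindex_snoc]
    by_cases h0 : x = q0 <;> by_cases h1 : x = q1
    · simp [← h0, ← h1]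
    · simp [← h0, h1, Ne.symm h1]
    · simp [h0, Ne.symm h0, ← h1]
    · simp [h0, h1, Ne.symm h0, Ne.symm h1]

-- ===== VERDICT (by name: the statement is the Claim_ definition above) =====
theorem MapListPhyToLog_spec : Claim_equal_MapListPhyToLog := by
  intro ml ql _
  unfold Spec_MapListPhyToLog MapListPhyToLog MapListPhyToLog_alt
  match ql with
  | [] => simp
  | [q0] =>
    simp only [List.length_cons, List.length_nil]
    norm_num
    rw [pvFoldA1 ml q0 (-1)]
    congr 1
    by_cases h : q0 ∈ ml <;> simp [h, pvRindex_notMem ml q0]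
  | [q0, q1] =>
    simp only [List.length_cons, List.length_nil]
    norm_num
    rw [show (List.replicate 2 (-1 : Int)) = [-1, -1] from rfl]
    rw [pvFoldA2 ml q0 q1 (-1) (-1)]
    congr 1
    · by_cases h : q0 ∈ ml <;> simp [h, pvRindex_notMem ml q0]
    · congr 1
      by_cases h : q1 ∈ ml <;> simp [h, pvRindex_notMem ml q1]
  | q0 :: q1 :: q2 :: rest =>
    have h : (q0 :: q1 :: q2 :: rest).length = rest.length + 3 := by simp
    rw [h]
    simp [show rest.length + 3 ≠ 2 by omega, show rest.length + 3 ≠ 1 by omega]
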